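-- pv_equiv track=rewrite | github.com/Warlockobama/DevSecOpsKB | zap-kb/scripts/zap_run_artifact.py | _rule_acronym
-- ===== SOURCE A (Python) =====
-- from typing import Any, Dict, Iterable, List, Optional, Sequence, Tuple
--
-- def _rule_acronym(text: str) -> str:
--     text = text.strip()
--     if not text:
--         return "ALRT"
--     tokens = []
--     word = ""
--     for ch in text:
--         if ch.isalnum():
--             word += ch
--         else:
--             if word:
--                 tokens.append(word)
--             word = ""
--     if word:
--         tokens.append(word)
--     stop = {"header", "missing", "not", "set", "detected", "found", "the", "and", "of", "to", "in", "for", "a", "an"}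
--     out: List[str] = []
--     for token in tokens:
--         if token.lower() in stop:
--             continue
--         out.append(token[0].upper())
--         if len(out) >= 5:
--             break
--     return "".join(out) or "ALRT"
-- ===== SOURCE B (Python) =====
-- def _rule_acronym(text: str) -> str:
--     text = text.strip()
--     if not text:
--         return "ALRT"
--     stop = {"header", "missing", "not", "set", "detected", "found", "the", "and", "of", "to", "in", "for", "a", "an"}
--     out = []
--     word = ""
--     for ch in text + " ":  # trailing sentinel flushes the last word
--         if ch.isalnum():
--             word += ch
--         else:
--             if word and word.lower() not in stop:
--                 out.append(word[0].upper())
--                 if len(out) >= 5: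
--                     break
--             word = ""
--     return "".join(out) or "ALRT"
-- ===== Notes on version B (the rewrite author's own statement) =====
-- stated objective: simpler
-- what changed: Replaced A's two-phase structure (first loop builds the full token list, second loop scans tokens for first letters with a break) by a single streaming pass over the characters plus a sentinel space, which emits each word's first letter at its closing boundary and breaks immediately at 5 letters.
import Mathlib
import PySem

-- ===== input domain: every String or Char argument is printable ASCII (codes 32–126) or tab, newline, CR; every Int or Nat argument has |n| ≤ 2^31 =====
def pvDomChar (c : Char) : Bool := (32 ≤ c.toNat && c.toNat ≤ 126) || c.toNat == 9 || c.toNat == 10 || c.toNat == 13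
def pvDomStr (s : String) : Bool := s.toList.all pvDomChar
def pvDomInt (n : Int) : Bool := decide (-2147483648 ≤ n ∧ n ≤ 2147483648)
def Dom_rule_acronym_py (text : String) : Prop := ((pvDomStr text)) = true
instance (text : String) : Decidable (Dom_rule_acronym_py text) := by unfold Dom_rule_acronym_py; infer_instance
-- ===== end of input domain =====

-- B replaces A's two-loop structure (tokenize all words, then scan tokens) with one
-- streaming pass over the characters (plus a sentinel space) that emits letters as
-- word boundaries are seen; same return value, objective: simpler.

-- ===== PORT A =====
def stopWords : List (List Char) :=
  ["header".toList, "missing".toList, "not".toList, "set".toList, "detected".toList,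
   "found".toList, "the".toList, "and".toList, "of".toList, "to".toList, "in".toList,
   "for".toList, "a".toList, "an".toList]

-- A's first loop: accumulate (tokens, word) over the characters
def aStep (st : List (List Char) × List Char) (c : Char) : List (List Char) × List Char :=
  if PySem.Chars.isalnum c then (st.1, st.2 ++ [c])
  else (if st.2 ≠ [] then st.1 ++ [st.2] else st.1, [])

-- A's second loop over the tokens, with the ≥5 break ('headD' guards token[0]; tokens are never empty)
def aloop : List (List Char) → List Char → List Char
  | [], out => out
  | t :: ts, out =>
    if PySem.Chars.lower t ∈ stopWords then aloop ts out
    else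
      let out' := out ++ [PySem.Chars.upperChar (t.headD ' ')]
      if 5 ≤ out'.length then out' else aloop ts out'

def rule_acronym_py (text : String) : String :=
  let s := PySem.Chars.strip text.toList
  if s = [] then "ALRT"
  else
    let p := s.foldl aStep ([], [])
    let tokens := if p.2 ≠ [] then p.1 ++ [p.2] else p.1
    let out := aloop tokens []
    if out = [] then "ALRT" else String.ofList out

-- ===== PORT B =====
-- one streaming pass: state = (current word, letters so far); non-alnum char flushes the word
def bgo : List Char → List Char → List Char → List Char
  | [], _, out => out
  | c :: cs, w, out =>
    if PySem.Chars.isalnum c then bgo cs (w ++ [c]) out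
    else if w ≠ [] ∧ PySem.Chars.lower w ∉ stopWords then
      let out' := out ++ [PySem.Chars.upperChar (w.headD ' ')]
      if 5 ≤ out'.length then out' else bgo cs [] out'
    else bgo cs [] out

def rule_acronym_py_alt (text : String) : String :=
  let s := PySem.Chars.strip text.toList
  if s = [] then "ALRT"
  else
    let out := bgo (s ++ [' ']) [] []
    if out = [] then "ALRT" else String.ofList out

-- ===== PRECONDITION & SPEC =====
def Spec_rule_acronym_py (text : String) (out : String) : Prop := out = rule_acronym_py_alt text
instance (text : String) (out : String) : Decidable (Spec_rule_acronym_py text out) := by unfold Spec_rule_acronym_py; infer_instance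

-- ===== CLAIM (what is proved, stated in full; the proofs are below) =====
def Claim_equal_rule_acronym_py : Prop := ∀ (text : String), Dom_rule_acronym_py text → Spec_rule_acronym_py text (rule_acronym_py text)

-- ===== LEMMAS AND PROOFS =====

-- the token list A's first loop produces when started with pending word w
def tokensOf : List Char → List Char → List (List Char)
  | [], w => if w = [] then [] else [w]
  | c :: cs, w =>
    if PySem.Chars.isalnum c then tokensOf cs (w ++ [c])
    else if w = [] then tokensOf cs [] else w :: tokensOf cs []

theorem tokFold (cs : List Char) (toks : List (List Char)) (w : List Char) :
    (if (cs.foldl aStep (toks, w)).2 ≠ [] then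
        (cs.foldl aStep (toks, w)).1 ++ [(cs.foldl aStep (toks, w)).2]
      else (cs.foldl aStep (toks, w)).1)
      = toks ++ tokensOf cs w := by
  induction cs generalizing toks w with
  | nil => by_cases hw : w = [] <;> simp [tokensOf, hw]
  | cons c cs ih =>
    rw [List.foldl_cons]
    by_cases h1 : PySem.Chars.isalnum c
    · rw [show aStep (toks, w) c = (toks, w ++ [c]) from by simp [aStep, h1], ih]
      simp [tokensOf, h1]
    · by_cases hw : w = []
      · rw [show aStep (toks, w) c = (toks, []) from by simp [aStep, h1, hw], ih]
        simp [tokensOf, h1, hw]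
      · rw [show aStep (toks, w) c = (toks ++ [w], []) from by simp [aStep, h1, hw], ih]
        simp [tokensOf, h1, hw]

theorem bgo_eq_aloop (cs w out : List Char) (h : out.length < 5) :
    bgo (cs ++ [' ']) w out = aloop (tokensOf cs w) out := by
  induction cs generalizing w out with
  | nil =>
    show bgo [' '] w out = aloop (tokensOf [] w) out
    simp only [bgo, tokensOf]
    rw [if_neg (by decide : ¬ PySem.Chars.isalnum ' ' = true)]
    by_cases hw : w = []
    · simp [hw, aloop]
    · rw [if_neg hw]
      by_cases hs : PySem.Chars.lower w ∈ stopWords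
      · rw [if_neg (by simp [hs])]
        simp [aloop, hs]
      · rw [if_pos ⟨hw, hs⟩]
        simp only [aloop]
        split_ifs <;> simp_all
  | cons c cs ih =>
    rw [List.cons_append]
    simp only [bgo]
    by_cases ha : PySem.Chars.isalnum c
    · rw [if_pos ha, ih _ _ h]
      simp [tokensOf, ha]
    · rw [if_neg ha]
      by_cases hw : w = []
      · rw [if_neg (by simp [hw]), ih _ _ h]
        simp [tokensOf, ha, hw]
      · by_cases hs : PySem.Chars.lower w ∈ stopWords
        · rw [if_neg (by simp [hs]), ih _ _ h]
          have ht : tokensOf (c :: cs) w = w :: tokensOf cs [] := by simp [tokensOf, ha, hw]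
          rw [ht]
          simp [aloop, hs]
        · rw [if_pos ⟨hw, hs⟩]
          have : tokensOf (c :: cs) w = w :: tokensOf cs [] := by simp [tokensOf, ha, hw]
          rw [this]
          simp only [aloop]
          rw [if_neg hs]
          split_ifs with h5
          · rfl
          · exact ih [] _ (by simp at h5 ⊢; omega)

-- ===== VERDICT (by name: the statement is the Claim_ definition above) =====
theorem rule_acronym_py_spec : Claim_equal_rule_acronym_py := by
  intro text _
  unfold Spec_rule_acronym_py rule_acronym_py rule_acronym_py_alt
  by_cases hs : PySem.Chars.strip text.toList = []
  · simp [hs]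
  · simp only [hs]
    rw [bgo_eq_aloop _ [] [] (by simp)]
    have := tokFold (PySem.Chars.strip text.toList) [] []
    simp only [List.nil_append] at this
    rw [this]
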